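-- pv_equiv track=rewrite | github.com/netcyber-glitch/Workspace-Brain | workspace_brain_gui.py | _preparse_root
-- ===== SOURCE A (Python) =====
-- def _preparse_root(argv: list[str]) -> str | None:
--     """
--     --root는 import 시점(settings/runtime 상수 계산) 전에 필요할 수 있어,
--     argparse 이전에 간단 파싱으로 환경변수를 먼저 세팅합니다.
--     """
--     if not argv:
--         return None
--
--     for a in argv:
--         if isinstance(a, str) and a.startswith("--root="):
--             v = a.split("=", 1)[1].strip().strip("\"").strip("'")
--             return v or None
--
--     try:
--         i = argv.index("--root")
--     except ValueError:
--         return None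
--
--     if i + 1 >= len(argv):
--         return None
--
--     v = str(argv[i + 1]).strip().strip("\"").strip("'")
--     if not v or v.startswith("--"):
--         return None
--     return v
-- ===== SOURCE B (Python) =====
-- def _preparse_root(argv: list[str]) -> str | None:
--     cand = None
--     recorded = False
--     n = len(argv)
--     for i, a in enumerate(argv):
--         if isinstance(a, str) and a.startswith("--root="):
--             v = a.split("=", 1)[1].strip().strip("\"").strip("'")
--             return v or None
--         if not recorded and a == "--root":
--             recorded = True
--             if i + 1 < n:
--                 v = str(argv[i + 1]).strip().strip("\"").strip("'")
--                 if v and not v.startswith("--"):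
--                     cand = v
--     return cand
-- ===== Notes on version B (the rewrite author's own statement) =====
-- stated objective: simpler
-- what changed: Replaced A's two sequential scans (a '--root=' scan, then argv.index('--root') plus an index-based lookahead) with a single forward enumerate pass that returns on the first '--root=' token and records the positional '--root value' candidate once.
import Mathlib
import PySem

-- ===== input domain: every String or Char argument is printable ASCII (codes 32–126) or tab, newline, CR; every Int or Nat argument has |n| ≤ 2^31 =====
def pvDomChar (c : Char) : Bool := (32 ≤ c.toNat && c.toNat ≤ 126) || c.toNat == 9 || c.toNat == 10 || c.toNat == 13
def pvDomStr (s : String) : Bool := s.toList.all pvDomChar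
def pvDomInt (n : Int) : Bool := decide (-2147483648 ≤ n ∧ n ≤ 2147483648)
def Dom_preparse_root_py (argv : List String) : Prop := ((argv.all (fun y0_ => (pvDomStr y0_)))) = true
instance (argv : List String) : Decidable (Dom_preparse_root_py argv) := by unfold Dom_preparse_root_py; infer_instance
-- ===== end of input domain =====

-- B replaces A's two sequential scans (a '--root=' scan, then argv.index('--root') plus a lookahead)
-- by one forward pass over enumerate(argv) that records the positional candidate once; objective: simpler single pass.

-- ===== PORT A =====
-- v = a.split("=", 1)[1].strip().strip('"').strip("'")
def pvStripA (s : String) : String :=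
  PySem.Str.stripChars (PySem.Str.stripChars (PySem.Str.strip s) "\"") "'"

def pvEqValA (a : String) : String :=
  pvStripA (match PySem.Str.splitMax? a "=" 1 with
    | some (_ :: v :: _) => v
    | _ => "")  -- unreachable: only called when a starts with "--root=", so '=' occurs and the split has two parts

-- the 'for a in argv' loop with its early return of 'v or None'
def pvFindEqA (argv : List String) : Option (Option String) :=
  match argv with
  | [] => none
  | a :: rest =>
    if PySem.Str.startswith a "--root=" then
      some (if pvEqValA a = "" then none else some (pvEqValA a))
    else pvFindEqA rest

def preparse_root_py (argv : List String) : Option String :=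
  if argv = [] then none
  else
    match pvFindEqA argv with
    | some r => r
    | none =>
      match PySem.List.index? argv "--root" with
      | none => none
      | some i =>
        if argv.length ≤ i + 1 then none
        else
          match PySem.List.pyGet? argv ((i : Int) + 1) with
          | some a =>
            let v := pvStripA a
            if v = "" ∨ PySem.Str.startswith v "--" then none else some v
          | none => none  -- unreachable: i + 1 < len(argv)

-- ===== PORT B =====
def pvStripB (s : String) : String :=
  PySem.Str.stripChars (PySem.Str.stripChars (PySem.Str.strip s) "\"") "'"

def pvEqValB (a : String) : String :=
  pvStripB (match PySem.Str.splitMax? a "=" 1 with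
    | some (_ :: v :: _) => v
    | _ => "")  -- unreachable, as in A

-- the single 'for i, a in enumerate(argv)' loop with state (cand, recorded)
def pvLoopB (argv : List String) (items : List (Int × String)) (cand : Option String) (recorded : Bool) :
    Option String :=
  match items with
  | [] => cand
  | (i, a) :: rest =>
    if PySem.Str.startswith a "--root=" then
      let v := pvEqValB a
      if v = "" then none else some v
    else if !recorded && a == "--root" then
      if i + 1 < (PySem.List.len argv) then
        let v := pvStripB ((PySem.List.pyGet? argv (i + 1)).getD "")  -- in range under the guard
        if v ≠ "" ∧ ¬ PySem.Str.startswith v "--" then pvLoopB argv rest (some v) true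
        else pvLoopB argv rest cand true
      else pvLoopB argv rest cand true
    else pvLoopB argv rest cand recorded

def preparse_root_py_alt (argv : List String) : Option String :=
  pvLoopB argv (PySem.List.enumerate argv) none false

-- ===== PRECONDITION & SPEC =====
def Spec_preparse_root_py (argv : List String) (out : Option String) : Prop := out = preparse_root_py_alt argv
instance (argv : List String) (out : Option String) : Decidable (Spec_preparse_root_py argv out) := by unfold Spec_preparse_root_py; infer_instance

-- ===== CLAIM (what is proved, stated in full; the proofs are below) =====
def Claim_equal_preparse_root_py : Prop := ∀ (argv : List String), Dom_preparse_root_py argv → Spec_preparse_root_py argv (preparse_root_py argv)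

-- ===== LEMMAS AND PROOFS =====

-- reference form of A's second phase: first "--root", look at the next element
def pvRefPos (xs : List String) : Option String :=
  match xs with
  | [] => none
  | a :: rest =>
    if a = "--root" then
      match rest with
      | [] => none
      | b :: _ =>
        let v := pvStripA b
        if v = "" ∨ PySem.Str.startswith v "--" then none else some v
    else pvRefPos rest

theorem pvLoopB_spec (xs : List String) : ∀ (argv : List String) (k : Nat)
    (cand : Option String) (recorded : Bool), xs = argv.drop k →
    (recorded = false → cand = none) →
    pvLoopB argv (PySem.List.enumerate xs k) cand recorded =
      match pvFindEqA xs with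
      | some r => r
      | none => if recorded then cand else pvRefPos xs := by
  induction xs with
  | nil =>
    intro argv k cand recorded _ hcand
    cases recorded with
    | true => simp [PySem.List.enumerate_nil, pvLoopB, pvFindEqA]
    | false => simp [PySem.List.enumerate_nil, pvLoopB, pvFindEqA, pvRefPos, hcand rfl]
  | cons a rest ih =>
    intro argv k cand recorded hdrop hcand
    have hk : k < argv.length := by
      by_contra h
      simp [List.drop_eq_nil_of_le (Nat.le_of_not_lt h)] at hdrop
    have hrest : rest = argv.drop (k + 1) := by
      have := congrArg List.tail hdrop
      simpa [List.tail_drop] using this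
    have ecast : ((k : Int) + 1) = ((k + 1 : Nat) : Int) := by push_cast; ring
    rw [PySem.List.enumerate_cons, pvLoopB]
    by_cases heq : PySem.Str.startswith a "--root=" = true
    · have hc : PySem.Chars.startswith a.toList ['-', '-', 'r', 'o', 'o', 't', '='] = true := by
        simpa using heq
      simp [hc, pvFindEqA, pvEqValA, pvEqValB, pvStripA, pvStripB]
    · have hcf := eq_false_of_ne_true heq
      have hc : PySem.Chars.startswith a.toList ['-', '-', 'r', 'o', 'o', 't', '='] = false := by
        simpa using hcf
      have hne : pvFindEqA (a :: rest) = pvFindEqA rest := by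
        simp [pvFindEqA, hc]
      rw [if_neg heq, hne]
      cases recorded with
      | true =>
        simp only [Bool.not_true, Bool.false_and, Bool.false_eq_true, if_false]
        rw [ecast, ih argv (k + 1) cand true hrest (by intro h; cases h)]
        cases pvFindEqA rest <;> rfl
      | false =>
        simp only [Bool.not_false, Bool.true_and]
        by_cases hroot : a = "--root"
        · have hbeq : (a == "--root") = true := by simp [hroot]
          rw [if_pos hbeq]
          have hlen : ((k : Int) + 1 < PySem.List.len argv) ↔ rest ≠ [] := by
            rw [PySem.List.len_eq, hrest]
            constructor
            · intro h hnil
              have := List.drop_eq_nil_iff.mp hnil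
              omega
            · intro h
              have : ¬ argv.length ≤ k + 1 := fun h2 => h (List.drop_eq_nil_of_le h2)
              omega
          have hget : PySem.List.pyGet? argv ((k : Int) + 1) = rest.head? := by
            rw [ecast, PySem.List.pyGet?_natCast, hrest, List.head?_drop]
          cases hrec : rest with
          | nil =>
            rw [if_neg (by rw [hlen, hrec]; simp)]
            have ihx := ih argv (k + 1) cand true (by simpa [hrec] using hrest)
              (by intro h; cases h)
            rw [hrec] at ihx
            rw [ecast, ihx]
            simp [pvFindEqA, pvRefPos, hroot, hcand rfl]
          | cons b bs =>
            rw [if_pos (by rw [hlen, hrec]; simp), hget, hrec]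
            simp only [List.head?_cons, Option.getD_some]
            by_cases hv : pvStripB b ≠ "" ∧ ¬ PySem.Str.startswith (pvStripB b) "--" = true
            · have ihx := ih argv (k + 1) (some (pvStripB b)) true
                (by simpa [hrec] using hrest) (by intro h; cases h)
              rw [hrec] at ihx
              rw [if_pos hv, ecast, ihx]
              rcases hv with ⟨h1, h2⟩
              cases pvFindEqA (b :: bs) with
              | some r => rfl
              | none =>
                have hA : ¬ (pvStripA b = "" ∨ PySem.Str.startswith (pvStripA b) "--" = true) := by
                  show ¬ (pvStripB b = "" ∨ PySem.Str.startswith (pvStripB b) "--" = true)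
                  rintro (h | h)
                  · exact h1 h
                  · exact h2 h
                simp only [pvRefPos, hroot, if_true]
                rw [if_neg hA]
                rfl
            · have ihx := ih argv (k + 1) cand true
                (by simpa [hrec] using hrest) (by intro h; cases h)
              rw [hrec] at ihx
              rw [if_neg hv, ecast, ihx]
              rw [Classical.not_and_iff_not_or_not, not_not, not_not] at hv
              cases pvFindEqA (b :: bs) with
              | some r => rfl
              | none =>
                have hA : pvStripA b = "" ∨ PySem.Str.startswith (pvStripA b) "--" = true := hv
                simp only [pvRefPos, hroot, if_true, if_pos hA, hcand rfl]
                simp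
        · have hbeq : (a == "--root") = false := by simpa using hroot
          rw [if_neg (by simp [hbeq])]
          rw [ecast, ih argv (k + 1) cand false hrest hcand]
          cases pvFindEqA rest with
          | some r => rfl
          | none => simp [pvRefPos, hroot]

theorem pvRefPos_eq_phase2 (argv : List String) :
    (match PySem.List.index? argv "--root" with
      | none => none
      | some i =>
        if argv.length ≤ i + 1 then none
        else
          match PySem.List.pyGet? argv ((i : Int) + 1) with
          | some a =>
            let v := pvStripA a
            if v = "" ∨ PySem.Str.startswith v "--" then none else some v
          | none => none) = pvRefPos argv := by
  induction argv with
  | nil => simp [pvRefPos, PySem.List.index?]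
  | cons a rest ih =>
    by_cases hroot : a = "--root"
    · subst hroot
      rw [PySem.List.index?_cons_self]
      cases rest with
      | nil => simp [pvRefPos]
      | cons b bs =>
        have : PySem.List.pyGet? ("--root" :: b :: bs) ((0 : Nat) + 1 : Int) = some b := by
          simp
        simp only [Nat.cast_zero, zero_add] at this ⊢
        rw [this]
        simp [pvRefPos]
    · rw [PySem.List.index?_cons_of_ne rest hroot]
      cases hi : PySem.List.index? rest "--root" with
      | none =>
        rw [hi] at ih
        simp only [Option.map_none]
        simpa [pvRefPos, hroot] using ih
      | some i =>
        simp only [Option.map_some]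
        have h2 : PySem.List.pyGet? (a :: rest) (((i + 1 : Nat) : Int) + 1) =
            PySem.List.pyGet? rest ((i : Int) + 1) := by
          have e1 : (((i + 1 : Nat) : Int) + 1) = (((i + 2 : Nat)) : Int) := by push_cast; ring
          have e2 : ((i : Int) + 1) = (((i + 1 : Nat)) : Int) := by push_cast; ring
          rw [e1, e2, PySem.List.pyGet?_natCast, PySem.List.pyGet?_natCast]
          simp
        rw [hi] at ih
        have hrp : pvRefPos (a :: rest) = pvRefPos rest := by
          simp [pvRefPos, hroot]
        rw [hrp, ← ih]
        simp only [List.length_cons]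
        rw [h2]
        by_cases hl : rest.length ≤ i + 1
        · rw [if_pos (by omega : (rest.length + 1 ≤ i + 1 + 1)), if_pos hl]
        · rw [if_neg (by omega : ¬(rest.length + 1 ≤ i + 1 + 1)), if_neg hl]

-- ===== VERDICT (by name: the statement is the Claim_ definition above) =====
theorem preparse_root_py_spec : Claim_equal_preparse_root_py := by
  intro argv _
  unfold Spec_preparse_root_py preparse_root_py preparse_root_py_alt
  have hloop := pvLoopB_spec argv argv 0 none false (by simp) (fun _ => rfl)
  simp only [Nat.cast_zero] at hloop
  rw [hloop]
  cases argv with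
  | nil => simp [pvFindEqA, pvRefPos]
  | cons a rest =>
    simp only [if_neg (List.cons_ne_nil a rest)]
    cases pvFindEqA (a :: rest) with
    | some r => rfl
    | none => simpa using pvRefPos_eq_phase2 (a :: rest)
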